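-- pv_equiv track=rewrite | github.com/april825/Hurricane-Analysis-Project | Hurricane Analysis Project - Dictionary.py | mort_scale
-- ===== SOURCE A (Python) =====
-- def mort_scale(d):
--     mortality_scale = {0: 0,
--                        1: 100,
--                        2: 500,
--                        3: 1000,
--                        4: 10000}
--     scales = sorted(mortality_scale.keys(), reverse=1)[1:]
--     for scale in scales:
--         if d > mortality_scale[scale]:
--             return scale+1
--     return 0
-- ===== SOURCE B (Python) =====
-- def mort_scale(d):
--     # Binary search for the number of thresholds strictly below d,
--     # instead of A's dict + reverse-sorted linear scan with early return.
--     thresholds = [0, 100, 500, 1000]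
--     lo, hi = 0, len(thresholds)
--     while lo < hi:
--         mid = (lo + hi) // 2
--         if thresholds[mid] < d:
--             lo = mid + 1
--         else:
--             hi = mid
--     return lo
-- ===== Notes on version B (the rewrite author's own statement) =====
-- stated objective: alternative
-- what changed: Replaces A's dict construction plus reverse-sorted-keys linear scan with early return by a hand-written binary search (bisect_left) over the sorted threshold list [0,100,500,1000], returning the count of thresholds strictly below d.
import Mathlib
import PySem

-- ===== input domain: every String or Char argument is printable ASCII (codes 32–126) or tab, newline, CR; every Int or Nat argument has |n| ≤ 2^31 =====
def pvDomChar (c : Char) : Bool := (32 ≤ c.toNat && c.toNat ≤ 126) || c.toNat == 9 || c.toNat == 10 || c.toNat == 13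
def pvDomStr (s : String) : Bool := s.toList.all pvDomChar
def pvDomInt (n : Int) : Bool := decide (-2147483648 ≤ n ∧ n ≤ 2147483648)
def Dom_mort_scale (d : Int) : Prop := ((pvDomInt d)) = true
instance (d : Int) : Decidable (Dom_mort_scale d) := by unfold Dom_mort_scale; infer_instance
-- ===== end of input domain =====

-- B replaces A's dict + reverse-sorted-keys linear scan by a binary search over the sorted thresholds (alternative structure, same result).

-- ===== PORT A =====
-- the for-loop: first scale (high to low) with d > mortality_scale[scale], else 0.
-- Every scale in the list is a key of the dict, so getD's default 0 is never read (mortality_scale[scale] never raises).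
def mortScan (ms : PySem.Dict Int Int) (d : Int) : List Int → Int
  | [] => 0
  | s :: rest => if ms.getD s 0 < d then s + 1 else mortScan ms d rest

def mort_scale (d : Int) : Int :=
  let mortality_scale : PySem.Dict Int Int :=
    ((((PySem.Dict.empty.insert 0 0).insert 1 100).insert 2 500).insert 3 1000).insert 4 10000
  let scales := PySem.List.slice (PySem.List.sorted (PySem.Dict.keys mortality_scale) (fun x => x) true) (some 1) none
  mortScan mortality_scale d scales

-- ===== PORT B =====
-- the while-loop of Source B: binary search; fuel = len(thresholds) bounds the iterations (the interval shrinks each step)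
def msLoop (thresholds : List Int) (d : Int) (lo hi : Int) : Nat → Int
  | 0 => lo
  | fuel + 1 =>
    if lo < hi then
      let mid := PySem.Int.floordiv (lo + hi) 2
      if ((PySem.List.pyGet? thresholds mid).getD 0) < d then
        msLoop thresholds d (mid + 1) hi fuel
      else
        msLoop thresholds d lo mid fuel
    else lo

def mort_scale_alt (d : Int) : Int :=
  let thresholds : List Int := [0, 100, 500, 1000]
  msLoop thresholds d 0 (thresholds.length : Int) thresholds.length

-- ===== PRECONDITION & SPEC =====
def Spec_mort_scale (d : Int) (out : Int) : Prop := out = mort_scale_alt d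
instance (d : Int) (out : Int) : Decidable (Spec_mort_scale d out) := by unfold Spec_mort_scale; infer_instance

-- ===== CLAIM (what is proved, stated in full; the proofs are below) =====
def Claim_equal_mort_scale : Prop := ∀ (d : Int), Dom_mort_scale d → Spec_mort_scale d (mort_scale d)

-- ===== LEMMAS AND PROOFS =====
-- A's value, made explicit: a four-way case split on d
lemma mort_scale_eval (d : Int) :
    mort_scale d = if 1000 < d then 4 else if 500 < d then 3 else if 100 < d then 2 else if 0 < d then 1 else 0 := by
  have hsorted : PySem.List.sorted
      (PySem.Dict.keys
        (((((PySem.Dict.empty.insert 0 0).insert 1 100).insert 2 500).insert 3 1000).insert 4 10000 : PySem.Dict Int Int))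
      (fun x => x) true = [4, 3, 2, 1, 0] := by decide
  have hget : ∀ k : Int,
      (((((PySem.Dict.empty.insert 0 0).insert 1 100).insert 2 500).insert 3 1000).insert 4 10000 : PySem.Dict Int Int).getD k 0
        = (if k = 4 then 10000 else if k = 3 then 1000 else if k = 2 then 500 else if k = 1 then 100 else if k = 0 then 0 else 0) := by
    intro k
    simp [PySem.Dict.getD_insert, PySem.Dict.getD_empty]
  simp only [mort_scale, hsorted, PySem.List.slice_from_one]
  simp only [List.tail, mortScan, hget]
  norm_num

lemma msLoop_succ (thresholds : List Int) (d lo hi : Int) (fuel : Nat) (h : lo < hi) :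
    msLoop thresholds d lo hi (fuel + 1) =
      if ((PySem.List.pyGet? thresholds (PySem.Int.floordiv (lo + hi) 2)).getD 0) < d then
        msLoop thresholds d (PySem.Int.floordiv (lo + hi) 2 + 1) hi fuel
      else msLoop thresholds d lo (PySem.Int.floordiv (lo + hi) 2) fuel := by
  simp only [msLoop, if_pos h]
lemma msLoop_stop (thresholds : List Int) (d lo hi : Int) (fuel : Nat) (h : ¬ lo < hi) :
    msLoop thresholds d lo hi fuel = lo := by
  cases fuel with
  | zero => rfl
  | succ f => simp only [msLoop, if_neg h]
lemma mort_scale_alt_eval (d : Int) :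
    mort_scale_alt d = if 1000 < d then 4 else if 500 < d then 3 else if 100 < d then 2 else if 0 < d then 1 else 0 := by
  have g01 : (PySem.List.pyGet? [0, 100, 500, 1000] (PySem.Int.floordiv (0 + 1 : Int) 2)).getD 0 = (0 : Int) := by decide
  have g02 : (PySem.List.pyGet? [0, 100, 500, 1000] (PySem.Int.floordiv (0 + 2 : Int) 2)).getD 0 = (100 : Int) := by decide
  have g04 : (PySem.List.pyGet? [0, 100, 500, 1000] (PySem.Int.floordiv (0 + 4 : Int) 2)).getD 0 = (500 : Int) := by decide
  have g34 : (PySem.List.pyGet? [0, 100, 500, 1000] (PySem.Int.floordiv (3 + 4 : Int) 2)).getD 0 = (1000 : Int) := by decide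
  have m01 : PySem.Int.floordiv (0 + 1 : Int) 2 + 1 = 1 := by decide
  have m02 : PySem.Int.floordiv (0 + 2 : Int) 2 + 1 = 2 := by decide
  have m04 : PySem.Int.floordiv (0 + 4 : Int) 2 + 1 = 3 := by decide
  have m34 : PySem.Int.floordiv (3 + 4 : Int) 2 + 1 = 4 := by decide
  have l01 : PySem.Int.floordiv (0 + 1 : Int) 2 = 0 := by decide
  have l02 : PySem.Int.floordiv (0 + 2 : Int) 2 = 1 := by decide
  have l04 : PySem.Int.floordiv (0 + 4 : Int) 2 = 2 := by decide
  have l34 : PySem.Int.floordiv (3 + 4 : Int) 2 = 3 := by decide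
  have t01 : msLoop [0, 100, 500, 1000] d 0 1 2 = if 0 < d then 1 else 0 := by
    rw [show (2 : Nat) = 1 + 1 from rfl, msLoop_succ _ _ _ _ _ (by norm_num), g01, m01, l01,
        msLoop_stop [0, 100, 500, 1000] d 1 1 1 (by norm_num),
        msLoop_stop [0, 100, 500, 1000] d 0 0 1 (by norm_num)]
  have t02 : msLoop [0, 100, 500, 1000] d 0 2 3 = if 100 < d then 2 else if 0 < d then 1 else 0 := by
    rw [show (3 : Nat) = 2 + 1 from rfl, msLoop_succ _ _ _ _ _ (by norm_num), g02, m02, l02,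
        msLoop_stop [0, 100, 500, 1000] d 2 2 2 (by norm_num), t01]
  have t34 : msLoop [0, 100, 500, 1000] d 3 4 3 = if 1000 < d then 4 else 3 := by
    rw [show (3 : Nat) = 2 + 1 from rfl, msLoop_succ _ _ _ _ _ (by norm_num), g34, m34, l34,
        msLoop_stop [0, 100, 500, 1000] d 4 4 2 (by norm_num),
        msLoop_stop [0, 100, 500, 1000] d 3 3 2 (by norm_num)]
  show msLoop [0, 100, 500, 1000] d 0 (([0, 100, 500, 1000] : List Int).length : Int) ([0, 100, 500, 1000] : List Int).length = _
  norm_num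
  rw [show (4 : Nat) = 3 + 1 from rfl, msLoop_succ _ _ _ _ _ (by norm_num), g04, m04, l04, t34, t02]
  split_ifs <;> omega

-- ===== VERDICT (by name: the statement is the Claim_ definition above) =====
theorem mort_scale_spec : Claim_equal_mort_scale := by
  intro d _
  unfold Spec_mort_scale
  rw [mort_scale_eval, mort_scale_alt_eval]
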